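-- pv_equiv track=rewrite | github.com/SilviStepanyan/homeworks | homework1.py | sum_of_all_numbers_from_min_to_max
-- ===== SOURCE A (Python) =====
-- def sum_of_all_numbers_from_min_to_max(a, b):
--     if a > b:
--         res = -b
--         while b < a:
--             res = res + b
--             b += 1
--         return res
--     elif a < b:
--         res = -a
--         while a < b:
--             res = res + a
--             a += 1
--         return res
-- ===== SOURCE B (Python) =====
-- def sum_of_all_numbers_from_min_to_max(a, b):
--     if a == b:
--         return None
--     lo, hi = (a, b) if a < b else (b, a)
--     # sum of lo..hi-1, then subtract lo once more (A starts res at -lo)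
--     return (lo + hi - 1) * (hi - lo) // 2 - lo
-- ===== Notes on version B (the rewrite author's own statement) =====
-- stated objective: faster
-- what changed: Replaces A's element-by-element while loop with the Gauss closed-form arithmetic-series formula (sum of min..max-1 minus min), keeping the None result when a == b.
import Mathlib
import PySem

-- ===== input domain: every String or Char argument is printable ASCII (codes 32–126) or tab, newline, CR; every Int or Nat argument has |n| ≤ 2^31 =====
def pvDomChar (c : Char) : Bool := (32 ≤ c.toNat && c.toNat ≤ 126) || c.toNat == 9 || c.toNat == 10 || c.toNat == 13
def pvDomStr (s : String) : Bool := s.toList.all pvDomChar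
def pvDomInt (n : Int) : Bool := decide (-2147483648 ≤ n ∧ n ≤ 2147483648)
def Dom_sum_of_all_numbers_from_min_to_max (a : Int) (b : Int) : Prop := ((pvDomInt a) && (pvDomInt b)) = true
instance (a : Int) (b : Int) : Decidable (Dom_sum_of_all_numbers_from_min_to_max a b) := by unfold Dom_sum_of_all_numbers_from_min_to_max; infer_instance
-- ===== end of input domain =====

-- B replaces A's O(|a-b|) while loop with the O(1) Gauss closed-form sum (return value only).


-- ===== PORT A =====
-- the 'while lo < hi: res += lo; lo += 1' loop of A, step for step
def pvLoopA (res lo hi : Int) : Int :=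
  if lo < hi then pvLoopA (res + lo) (lo + 1) hi else res
termination_by (hi - lo).toNat
decreasing_by omega

def sum_of_all_numbers_from_min_to_max (a : Int) (b : Int) : Option Int :=
  if a > b then some (pvLoopA (-b) b a)
  else if a < b then some (pvLoopA (-a) a b)
  else none

-- ===== PORT B =====
def sum_of_all_numbers_from_min_to_max_alt (a : Int) (b : Int) : Option Int :=
  if a = b then none
  else
    let lo := if a < b then a else b
    let hi := if a < b then b else a
    some (PySem.Int.floordiv ((lo + hi - 1) * (hi - lo)) 2 - lo)

-- ===== PRECONDITION & SPEC =====
def Spec_sum_of_all_numbers_from_min_to_max (a : Int) (b : Int) (out : Option Int) : Prop := out = sum_of_all_numbers_from_min_to_max_alt a b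
instance (a : Int) (b : Int) (out : Option Int) : Decidable (Spec_sum_of_all_numbers_from_min_to_max a b out) := by unfold Spec_sum_of_all_numbers_from_min_to_max; infer_instance

-- ===== CLAIM (what is proved, stated in full; the proofs are below) =====
def Claim_equal_sum_of_all_numbers_from_min_to_max : Prop := ∀ (a : Int) (b : Int), Dom_sum_of_all_numbers_from_min_to_max a b → Spec_sum_of_all_numbers_from_min_to_max a b (sum_of_all_numbers_from_min_to_max a b)

-- ===== LEMMAS AND PROOFS =====

theorem pvLoopA_double (n : Nat) : ∀ (r lo : Int), 2 * pvLoopA r lo (lo + n) = 2 * r + (2 * lo + n - 1) * n := by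
  induction n with
  | zero =>
    intro r lo
    rw [pvLoopA]
    simp
  | succ n ih =>
    intro r lo
    rw [pvLoopA]
    have h : lo < lo + ((n : Int) + 1) := by omega
    have e : lo + ((n : Int) + 1) = (lo + 1) + (n : Int) := by ring
    push_cast
    rw [if_pos h, e, ih (r + lo) (lo + 1)]
    ring

theorem pvLoopA_closed (lo hi : Int) (h : lo ≤ hi) :
    pvLoopA (-lo) lo hi = PySem.Int.floordiv ((lo + hi - 1) * (hi - lo)) 2 - lo := by
  obtain ⟨n, hn⟩ : ∃ n : Nat, hi = lo + n := ⟨(hi - lo).toNat, by omega⟩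
  subst hn
  have hd := pvLoopA_double n (-lo) lo
  have hmul : (lo + (lo + n) - 1) * (lo + n - lo) = 2 * (pvLoopA (-lo) lo (lo + n) + lo) := by
    push_cast at hd ⊢; nlinarith [hd]
  rw [hmul]
  have : PySem.Int.floordiv (2 * (pvLoopA (-lo) lo (lo + n) + lo)) 2
      = pvLoopA (-lo) lo (lo + n) + lo := by
    rw [PySem.Int.floordiv_eq_ediv_of_pos (by omega)]
    omega
  rw [this]; ring

-- ===== VERDICT (by name: the statement is the Claim_ definition above) =====
theorem sum_of_all_numbers_from_min_to_max_spec : Claim_equal_sum_of_all_numbers_from_min_to_max := by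
  intro a b _
  unfold Spec_sum_of_all_numbers_from_min_to_max
  unfold sum_of_all_numbers_from_min_to_max sum_of_all_numbers_from_min_to_max_alt
  rcases lt_trichotomy a b with h | h | h
  · rw [if_neg (by omega), if_pos h, if_neg (by omega : ¬ a = b)]
    simp only [if_pos h]
    rw [pvLoopA_closed a b (le_of_lt h)]
  · subst h; simp
  · rw [if_pos h, if_neg (by omega : ¬ a = b)]
    simp only [if_neg (by omega : ¬ a < b)]
    rw [pvLoopA_closed b a (le_of_lt h)]
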